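-- pv_equiv track=rewrite | github.com/wehr-to/netmiko-ops-scripts | automation_ops/security_hardening/check_missing_vty_acl.py | parse_vty_acl
-- ===== SOURCE A (Python) =====
-- from typing import List, Dict
--
-- def parse_vty_acl(output: str) -> List[Dict[str, str]]:
--     results = []
--     lines = output.splitlines()
--     current_vty = None
--     has_acl = False
--     for line in lines:
--         if line.strip().startswith("line vty"):
--             if current_vty is not None:
--                 results.append({"VTY Line": current_vty, "Access-Class Present": "Yes" if has_acl else "No"})
--             current_vty = line.strip()
--             has_acl = False
--         elif "access-class" in line and current_vty:
--             has_acl = True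
--     if current_vty is not None:
--         results.append({"VTY Line": current_vty, "Access-Class Present": "Yes" if has_acl else "No"})
--     return results
-- ===== SOURCE B (Python) =====
-- def parse_vty_acl(output):
--     lines = output.splitlines()
--     segments = []  # (header, body) pairs; lines before the first header are ignored
--     for line in lines:
--         stripped = line.strip()
--         if stripped.startswith("line vty"):
--             segments.append((stripped, []))
--         elif segments:
--             segments[-1][1].append(line)
--     return [{"VTY Line": header,
--              "Access-Class Present": "Yes" if any("access-class" in l for l in body) else "No"}
--             for header, body in segments]
-- ===== Notes on version B (the rewrite author's own statement) =====
-- stated objective: alternative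
-- what changed: Replaced A's single pass with running state (current header, has_acl flag, flush-on-next-header and at end) by a group-then-map decomposition: first split the lines into (header, body) segments, then render each segment independently.
import Mathlib
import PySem

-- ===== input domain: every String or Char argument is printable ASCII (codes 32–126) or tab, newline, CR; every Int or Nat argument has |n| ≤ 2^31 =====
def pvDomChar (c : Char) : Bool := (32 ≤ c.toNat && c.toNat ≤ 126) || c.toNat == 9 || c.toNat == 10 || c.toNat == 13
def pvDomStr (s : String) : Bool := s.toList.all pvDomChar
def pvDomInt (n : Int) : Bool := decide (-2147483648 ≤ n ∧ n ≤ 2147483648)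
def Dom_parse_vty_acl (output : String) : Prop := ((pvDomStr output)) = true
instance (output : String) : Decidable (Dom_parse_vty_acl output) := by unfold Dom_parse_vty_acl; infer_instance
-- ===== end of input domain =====

-- B replaces A's running-state single pass by a group-then-map decomposition (split into
-- header/body segments, then render each segment); objective: alternative structure, same cost.

-- ===== PORT A =====
-- state = (results, current_vty, has_acl)
def pvAStep (st : List (List (String × String)) × Option String × Bool) (line : String) :
    List (List (String × String)) × Option String × Bool :=
  if PySem.Str.startswith (PySem.Str.strip line) "line vty" then
    match st with
    | (results, some v, ha) =>
        (results ++ [[("VTY Line", v), ("Access-Class Present", if ha then "Yes" else "No")]],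
         some (PySem.Str.strip line), false)
    | (results, none, _) => (results, some (PySem.Str.strip line), false)
  else
    match st with
    | (results, some v, ha) =>
        -- 'current_vty' truthy in Python = not None and nonempty string
        if PySem.Str.isIn "access-class" line && !(v == "") then (results, some v, true)
        else (results, some v, ha)
    | st => st

def parse_vty_acl (output : String) : List (List (String × String)) :=
  match (PySem.Str.splitlines output).foldl pvAStep ([], none, false) with
  | (results, some v, ha) =>
      results ++ [[("VTY Line", v), ("Access-Class Present", if ha then "Yes" else "No")]]
  | (results, none, _) => results

-- ===== PORT B =====
-- segments[-1][1].append(line)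
def pvAppendLast (segs : List (String × List String)) (line : String) :
    List (String × List String) :=
  match segs with
  | [] => []
  | [(h, b)] => [(h, b ++ [line])]
  | p :: rest => p :: pvAppendLast rest line

def pvBStep (segs : List (String × List String)) (line : String) : List (String × List String) :=
  if PySem.Str.startswith (PySem.Str.strip line) "line vty" then
    segs ++ [(PySem.Str.strip line, [])]
  else if segs.isEmpty then segs
  else pvAppendLast segs line

def pvRender (seg : String × List String) : List (String × String) :=
  [("VTY Line", seg.1),
   ("Access-Class Present",
     if seg.2.any (fun l => PySem.Str.isIn "access-class" l) then "Yes" else "No")]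

def parse_vty_acl_alt (output : String) : List (List (String × String)) :=
  (((PySem.Str.splitlines output).foldl pvBStep []).map pvRender)

-- ===== PRECONDITION & SPEC =====
def Spec_parse_vty_acl (output : String) (out : List (List (String × String))) : Prop := out = parse_vty_acl_alt output
instance (output : String) (out : List (List (String × String))) : Decidable (Spec_parse_vty_acl output out) := by unfold Spec_parse_vty_acl; infer_instance

-- ===== CLAIM (what is proved, stated in full; the proofs are below) =====
def Claim_equal_parse_vty_acl : Prop := ∀ (output : String), Dom_parse_vty_acl output → Spec_parse_vty_acl output (parse_vty_acl output)

-- ===== LEMMAS AND PROOFS =====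

-- A's final flush, as a named function (definitionally what parse_vty_acl does after the fold)
def pvFinish (st : List (List (String × String)) × Option String × Bool) :
    List (List (String × String)) :=
  match st with
  | (results, some v, ha) =>
      results ++ [[("VTY Line", v), ("Access-Class Present", if ha then "Yes" else "No")]]
  | (results, none, _) => results

lemma pvAppendLast_cons_of_ne (p : String × List String) (t : List (String × List String))
    (l : String) (ht : t ≠ []) : pvAppendLast (p :: t) l = p :: pvAppendLast t l := by
  cases t with
  | nil => exact absurd rfl ht
  | cons q r => rfl

lemma pvAppendLast_ne_nil (segs : List (String × List String)) (l : String) (h : segs ≠ []) :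
    pvAppendLast segs l ≠ [] := by
  cases segs with
  | nil => exact absurd rfl h
  | cons p t =>
    cases t with
    | nil => obtain ⟨a, b⟩ := p; simp [pvAppendLast]
    | cons q r => rw [pvAppendLast_cons_of_ne _ _ _ (by simp)]; simp

lemma pvAppendLast_append (s₀ ss : List (String × List String)) (l : String) (h : ss ≠ []) :
    pvAppendLast (s₀ ++ ss) l = s₀ ++ pvAppendLast ss l := by
  induction s₀ with
  | nil => simp
  | cons p t ih =>
    have : t ++ ss ≠ [] := by simp [h]
    rw [List.cons_append, pvAppendLast_cons_of_ne _ _ _ this, ih, List.cons_append]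

lemma foldl_B_split (lines : List String) : ∀ (s₀ ss : List (String × List String)), ss ≠ [] →
    List.foldl pvBStep (s₀ ++ ss) lines = s₀ ++ List.foldl pvBStep ss lines := by
  induction lines with
  | nil => intro s₀ ss h; simp
  | cons line rest ih =>
    intro s₀ ss h
    simp only [List.foldl_cons]
    by_cases hh : PySem.Str.startswith (PySem.Str.strip line) "line vty" = true
    · have hh2 : PySem.Chars.startswith (PySem.Chars.strip line.toList)
          ['l','i','n','e',' ','v','t','y'] = true := by simpa using hh
      rw [show pvBStep (s₀ ++ ss) line = s₀ ++ (ss ++ [(PySem.Str.strip line, [])]) by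
        simp [pvBStep, hh2],
        show pvBStep ss line = ss ++ [(PySem.Str.strip line, [])] by simp [pvBStep, hh2]]
      exact ih s₀ _ (by simp)
    · have hh2 : PySem.Chars.startswith (PySem.Chars.strip line.toList)
          ['l','i','n','e',' ','v','t','y'] = false := by simpa using hh
      have hne : s₀ ++ ss ≠ [] := by simp [h]
      rw [show pvBStep (s₀ ++ ss) line = s₀ ++ pvAppendLast ss line by
        simp [pvBStep, hh2, List.isEmpty_eq_false_iff.mpr hne, pvAppendLast_append _ _ _ h],
        show pvBStep ss line = pvAppendLast ss line by
        simp [pvBStep, hh2, List.isEmpty_eq_false_iff.mpr h]]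
      exact ih s₀ _ (pvAppendLast_ne_nil _ _ h)

lemma strip_ne_empty_of_header (line : String)
    (h : PySem.Str.startswith (PySem.Str.strip line) "line vty" = true) :
    ¬ (PySem.Str.strip line = "") := by
  intro he
  rw [he] at h
  simp [PySem.Str.startswith] at h
  have := (PySem.Chars.startswith_iff _ _).mp h
  simp at this

lemma main_some (lines : List String) :
    ∀ (results : List (List (String × String))) (v : String) (body : List String), v ≠ "" →
    pvFinish (List.foldl pvAStep
        (results, some v, body.any (fun l => PySem.Str.isIn "access-class" l)) lines)
      = results ++ (List.foldl pvBStep [(v, body)] lines).map pvRender := by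
  induction lines with
  | nil =>
    intro results v body hv
    simp [pvFinish, pvRender]
  | cons line rest ih =>
    intro results v body hv
    simp only [List.foldl_cons]
    by_cases hh : PySem.Str.startswith (PySem.Str.strip line) "line vty" = true
    · have hh2 : PySem.Chars.startswith (PySem.Chars.strip line.toList)
          ['l','i','n','e',' ','v','t','y'] = true := by simpa using hh
      have hv' : PySem.Str.strip line ≠ "" := strip_ne_empty_of_header line hh
      rw [show pvAStep (results, some v, body.any (fun l => PySem.Str.isIn "access-class" l)) line
            = (results ++ [pvRender (v, body)], some (PySem.Str.strip line),
               List.any [] (fun l => PySem.Str.isIn "access-class" l)) by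
          simp [pvAStep, hh2, pvRender],
        show pvBStep [(v, body)] line = [(v, body)] ++ [(PySem.Str.strip line, [])] by
          simp [pvBStep, hh2]]
      rw [foldl_B_split rest [(v, body)] [(PySem.Str.strip line, [])] (by simp)]
      rw [ih (results ++ [pvRender (v, body)]) (PySem.Str.strip line) [] hv']
      simp
    · have hh2 : PySem.Chars.startswith (PySem.Chars.strip line.toList)
          ['l','i','n','e',' ','v','t','y'] = false := by simpa using hh
      have hA : pvAStep (results, some v, body.any (fun l => PySem.Str.isIn "access-class" l)) line
          = (results, some v,
             (body ++ [line]).any (fun l => PySem.Str.isIn "access-class" l)) := by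
        by_cases hc : PySem.Chars.isIn ['a','c','c','e','s','s','-','c','l','a','s','s']
            line.toList = true
        · simp [pvAStep, hh2, hc, hv]
        · simp [pvAStep, hh2, hc]
      rw [hA,
        show pvBStep [(v, body)] line = [(v, body ++ [line])] by
          simp [pvBStep, hh2, pvAppendLast]]
      exact ih results v (body ++ [line]) hv

lemma main_none (lines : List String) :
    pvFinish (List.foldl pvAStep ([], none, false) lines)
      = (List.foldl pvBStep [] lines).map pvRender := by
  induction lines with
  | nil => simp [pvFinish]
  | cons line rest ih =>
    simp only [List.foldl_cons]
    by_cases hh : PySem.Str.startswith (PySem.Str.strip line) "line vty" = true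
    · have hh2 : PySem.Chars.startswith (PySem.Chars.strip line.toList)
          ['l','i','n','e',' ','v','t','y'] = true := by simpa using hh
      rw [show pvAStep ([], none, false) line
            = (([] : List (List (String × String))), some (PySem.Str.strip line),
               List.any [] (fun l => PySem.Str.isIn "access-class" l)) by simp [pvAStep, hh2],
        show pvBStep [] line = [(PySem.Str.strip line, [])] by simp [pvBStep, hh2]]
      exact main_some rest [] (PySem.Str.strip line) [] (strip_ne_empty_of_header line hh)
    · have hh2 : PySem.Chars.startswith (PySem.Chars.strip line.toList)
          ['l','i','n','e',' ','v','t','y'] = false := by simpa using hh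
      rw [show pvAStep ([], none, false) line = (([] : List (List (String × String))), none, false) by
          simp [pvAStep, hh2],
        show pvBStep [] line = [] by simp [pvBStep, hh2]]
      exact ih

-- ===== VERDICT (by name: the statement is the Claim_ definition above) =====
theorem parse_vty_acl_spec : Claim_equal_parse_vty_acl := by
  intro output _
  show parse_vty_acl output = parse_vty_acl_alt output
  have h := main_none (PySem.Str.splitlines output)
  simpa [parse_vty_acl, parse_vty_acl_alt, pvFinish] using h
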